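-- pv_equiv track=rewrite | github.com/isaac-vb/advent-of-code-2023 | day7/day7.py | joker_sorting
-- ===== SOURCE A (Python) =====
-- def joker_sorting(card_counts: dict):
--     """Converts the joker cards in a hand accordingly"""
--     joker_card_count = card_counts.get("J")
--     del card_counts["J"]
--
--     max_occurences = {card: count for card, count in card_counts.items(
--     ) if count >= max(card_counts.values())}
--
--     most_common_card = list(max_occurences.keys())[0]
--
--     card_counts[most_common_card] += joker_card_count
--
--     return card_counts
-- ===== SOURCE B (Python) =====
-- def joker_sorting(card_counts: dict):
--     """Converts the joker cards in a hand accordingly"""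
--     joker_card_count = card_counts.pop("J")
--     best_card = None
--     best_count = None
--     for card, count in card_counts.items():
--         if best_count is None or count > best_count:
--             best_card, best_count = card, count
--     card_counts[best_card] += joker_card_count
--     return card_counts
-- ===== Notes on version B (the rewrite author's own statement) =====
-- stated objective: simpler
-- what changed: B pops the joker count and finds the most common card with one running-max loop over the remaining entries (strict '>' keeps the first max, matching A's tie-break), instead of A's dict comprehension that filters entries by comparison with max(values) re-evaluated per entry and then takes the first surviving key.
-- outside the precondition, e.g. on joker_sorting({}): A raises KeyError, B raises KeyError
import Mathlib
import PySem

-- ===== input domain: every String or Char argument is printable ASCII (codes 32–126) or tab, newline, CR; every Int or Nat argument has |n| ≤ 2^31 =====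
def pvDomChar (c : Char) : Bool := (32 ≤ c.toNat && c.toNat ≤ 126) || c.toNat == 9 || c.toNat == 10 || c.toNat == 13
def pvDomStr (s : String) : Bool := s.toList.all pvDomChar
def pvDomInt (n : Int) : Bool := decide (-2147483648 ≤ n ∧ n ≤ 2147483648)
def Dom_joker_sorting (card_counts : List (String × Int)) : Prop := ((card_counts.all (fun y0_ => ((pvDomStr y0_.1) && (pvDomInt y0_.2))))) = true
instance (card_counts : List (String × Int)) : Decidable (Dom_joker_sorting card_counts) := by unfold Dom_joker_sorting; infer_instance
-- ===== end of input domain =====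

-- B replaces A's filter-by-max(values) comprehension with a single running-max loop over the
-- remaining entries (objective: simpler). Both A and B mutate the argument dict in place
-- identically (delete "J", bump the top card); the equivalence proved here is about the
-- returned dict's items.

-- ===== PORT A =====
def joker_sorting (card_counts : List (String × Int)) : List (String × Int) :=
  let d := PySem.Dict.mk card_counts
  let joker_card_count := (PySem.Dict.get? d "J").getD 0  -- card_counts.get("J"); del "J" raises KeyError unless present (Pre_)
  let d1 := PySem.Dict.erase d "J"
  -- max(card_counts.values()) inside the comprehension: same value each iteration; the empty case is excluded by Pre_ (IndexError below)
  let maxv := (PySem.List.max? (PySem.Dict.values d1) (fun v => v)).getD 0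
  let max_occurences := PySem.Dict.mk ((PySem.Dict.items d1).filter (fun p => decide (maxv ≤ p.2)))
  let most_common_card := ((PySem.Dict.keys max_occurences).head?).getD ""  -- list(...)[0]; IndexError excluded by Pre_
  (PySem.Dict.modify d1 most_common_card 0 (fun v => v + joker_card_count)).items

-- ===== PORT B =====
-- the 'for card, count in card_counts.items()' running-max loop of Source B, as structural recursion;
-- the accumulator is Source B's (best_card, best_count) pair (none = both still None: they are set together)
def pvBestLoop (rest : List (String × Int)) (best : Option (String × Int)) : Option (String × Int) :=
  match rest with
  | [] => best
  | (card, count) :: tl =>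
      pvBestLoop tl (match best with
        | none => some (card, count)                             -- best_count is None
        | some (bc, bn) => if bn < count then some (card, count) else some (bc, bn))  -- count > best_count

def joker_sorting_alt (card_counts : List (String × Int)) : List (String × Int) :=
  let d := PySem.Dict.mk card_counts
  let joker_card_count := (PySem.Dict.get? d "J").getD 0  -- card_counts.pop("J"); KeyError excluded by Pre_
  let d1 := PySem.Dict.erase d "J"
  let best := pvBestLoop (PySem.Dict.items d1) none
  let best_card := (best.map Prod.fst).getD ""  -- best_card is None on the empty loop; KeyError below excluded by Pre_
  (PySem.Dict.modify d1 best_card 0 (fun v => v + joker_card_count)).items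

-- ===== PRECONDITION & SPEC =====
-- Pre_ excludes: association lists with duplicate keys (the argument is a Python dict, which cannot
-- have them), dicts without key "J" (A raises KeyError on del) and dicts whose only key is "J"
-- (A raises IndexError on list(...)[0]).
def Pre_joker_sorting (card_counts : List (String × Int)) : Prop :=
  (card_counts.map Prod.fst).Nodup ∧ "J" ∈ card_counts.map Prod.fst ∧ 2 ≤ card_counts.length
instance (card_counts : List (String × Int)) : Decidable (Pre_joker_sorting card_counts) := by
  unfold Pre_joker_sorting; infer_instance

def pvWitness_joker_sorting : (List (String × Int)) := [("J", 2), ("A", 3), ("K", 3)]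

def Spec_joker_sorting (card_counts : List (String × Int)) (out : List (String × Int)) : Prop := out = joker_sorting_alt card_counts
instance (card_counts : List (String × Int)) (out : List (String × Int)) : Decidable (Spec_joker_sorting card_counts out) := by unfold Spec_joker_sorting; infer_instance

-- ===== CLAIM (what is proved, stated in full; the proofs are below) =====
def Claim_equal_joker_sorting : Prop := ∀ (card_counts : List (String × Int)), Dom_joker_sorting card_counts → Pre_joker_sorting card_counts → Spec_joker_sorting card_counts (joker_sorting card_counts)

-- ===== LEMMAS AND PROOFS =====

-- the pure running-max step (first extremal element wins ties)
def pvStep {α κ : Type} [LinearOrder κ] (key : α → κ) : α → α → α :=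
  fun m x => if key m < key x then x else m

lemma pv_foldl_opt {α κ : Type} [LinearOrder κ] (key : α → κ) :
    ∀ (xs : List α) (a : α),
      List.foldl (fun acc x => match acc with
        | none => some x
        | some m => if key m < key x then some x else some m) (some a) xs
      = some (List.foldl (pvStep key) a xs) := by
  intro xs
  induction xs with
  | nil => intro a; rfl
  | cons x xs ih =>
    intro a
    simp only [List.foldl]
    have h : (if key a < key x then some x else some a) = some (pvStep key a x) := by
      unfold pvStep; split <;> rfl
    rw [h, ih]

lemma pv_max?_cons {α κ : Type} [LinearOrder κ] (key : α → κ) (a : α) (xs : List α) :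
    PySem.List.max? (a :: xs) key = some (List.foldl (pvStep key) a xs) := by
  simp only [PySem.List.max?, List.foldl]
  exact pv_foldl_opt key xs a

lemma pv_max?_map {α β κ : Type} [LinearOrder κ] (f : α → β) (key : β → κ) :
    ∀ (l : List α) (o : Option α),
      List.foldl (fun acc x => match acc with
        | none => some x
        | some m => if key m < key x then some x else some m) (o.map f) (l.map f)
      = (List.foldl (fun acc x => match acc with
        | none => some x
        | some m => if key (f m) < key (f x) then some x else some m) o l).map f := by
  intro l
  induction l with
  | nil => intro o; rfl
  | cons x xs ih =>
    intro o
    cases o with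
    | none => simpa using ih (some x)
    | some m =>
      simp only [List.map, List.foldl, Option.map]
      by_cases h : key (f m) < key (f x)
      · simp only [h, if_pos]
        simpa using ih (some x)
      · simp only [h, if_neg, not_false_iff]
        simpa using ih (some m)

lemma pv_max?_map' {α β κ : Type} [LinearOrder κ] (f : α → β) (key : β → κ) (l : List α) :
    PySem.List.max? (l.map f) key = (PySem.List.max? l (fun x => key (f x))).map f := by
  simp only [PySem.List.max?]
  have := pv_max?_map f key l none
  simpa using this

-- Source B's loop with a running value is the pure running-max fold
lemma pv_bestLoop_some :
    ∀ (xs : List (String × Int)) (b : String × Int),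
      pvBestLoop xs (some b)
        = some (List.foldl (pvStep (fun q : String × Int => q.2)) b xs) := by
  intro xs
  induction xs with
  | nil => intro b; rfl
  | cons x tl ih =>
    intro b
    obtain ⟨bc, bn⟩ := b
    obtain ⟨xc, xn⟩ := x
    simp only [pvBestLoop, List.foldl]
    have h : (if bn < xn then some (xc, xn) else some (bc, bn))
        = some (pvStep (fun q : String × Int => q.2) (bc, bn) (xc, xn)) := by
      unfold pvStep; split <;> rfl
    rw [h, ih]

lemma pv_bestLoop_cons (p : String × Int) (rest : List (String × Int)) :
    pvBestLoop (p :: rest) none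
      = some (List.foldl (pvStep (fun q : String × Int => q.2)) p rest) := by
  obtain ⟨pc, pn⟩ := p
  simp only [pvBestLoop]
  exact pv_bestLoop_some rest (pc, pn)

lemma pv_foldl_step_cases {α κ : Type} [LinearOrder κ] (key : α → κ) :
    ∀ (xs : List α) (a : α),
      List.foldl (pvStep key) a xs = a ∨ key a < key (List.foldl (pvStep key) a xs) := by
  intro xs
  induction xs with
  | nil => intro a; exact Or.inl rfl
  | cons x xs ih =>
    intro a
    simp only [List.foldl]
    by_cases h : key a < key x
    · have hstep : pvStep key a x = x := by unfold pvStep; simp [h]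
      rw [hstep]
      rcases ih x with h1 | h1
      · rw [h1]; exact Or.inr h
      · exact Or.inr (lt_trans h h1)
    · have hstep : pvStep key a x = a := by unfold pvStep; simp [h]
      rw [hstep]; exact ih a

lemma pv_foldl_isMax {α κ : Type} [LinearOrder κ] (key : α → κ) (xs : List α) (a : α) :
    ∀ y ∈ a :: xs, key y ≤ key (List.foldl (pvStep key) a xs) :=
  PySem.List.max?_isMax (pv_max?_cons key a xs)

lemma pv_filter_head {α κ : Type} [LinearOrder κ] (key : α → κ) :
    ∀ (xs : List α) (a : α),
      ((a :: xs).filter (fun y => decide (key (List.foldl (pvStep key) a xs) ≤ key y))).head?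
      = some (List.foldl (pvStep key) a xs) := by
  intro xs
  induction xs with
  | nil => intro a; simp
  | cons x xs ih =>
    intro a
    by_cases hx : key a < key x
    · have hstep : pvStep key a x = x := by unfold pvStep; simp [hx]
      have hr : List.foldl (pvStep key) a (x :: xs) = List.foldl (pvStep key) x xs := by
        simp only [List.foldl, hstep]
      have hxr : key x ≤ key (List.foldl (pvStep key) x xs) :=
        pv_foldl_isMax key xs x x (List.mem_cons_self ..)
      have hpa : ¬ (key (List.foldl (pvStep key) x xs) ≤ key a) := by
        intro h; exact absurd (lt_of_lt_of_le hx (le_trans hxr h)) (lt_irrefl _)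
      rw [hr]
      rw [List.filter_cons_of_neg (by simpa using hpa)]
      exact ih x
    · have hstep : pvStep key a x = a := by unfold pvStep; simp [hx]
      have hr : List.foldl (pvStep key) a (x :: xs) = List.foldl (pvStep key) a xs := by
        simp only [List.foldl, hstep]
      rw [hr]
      rcases pv_foldl_step_cases key xs a with h1 | h1
      · rw [h1]
        rw [List.filter_cons_of_pos (by simp)]
        rfl
      · have hpa : ¬ (key (List.foldl (pvStep key) a xs) ≤ key a) := not_le_of_gt h1
        have hpx : ¬ (key (List.foldl (pvStep key) a xs) ≤ key x) := by
          intro h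
          exact hpa (le_trans h (le_of_not_gt hx))
        rw [List.filter_cons_of_neg (by simpa using hpa),
            List.filter_cons_of_neg (by simpa using hpx)]
        have := ih a
        rwa [List.filter_cons_of_neg (by simpa using hpa)] at this

-- ===== VERDICT =====
theorem joker_sorting_spec : Claim_equal_joker_sorting := by
  intro cc _hDom hPre
  obtain ⟨hnd, _hJ, hlen⟩ := hPre
  unfold Spec_joker_sorting joker_sorting joker_sorting_alt
  -- the erased items list
  set l : List (String × Int) := (PySem.Dict.erase (PySem.Dict.mk cc) "J").items with hl
  -- l is nonempty: cc has two entries with distinct keys, at most one key is "J"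
  have hlne : l ≠ [] := by
    match cc, hlen with
    | c1 :: c2 :: t, _ =>
      have hne : c1.1 ≠ c2.1 := by
        simp only [List.map, List.nodup_cons, List.mem_cons] at hnd
        exact fun h => hnd.1 (Or.inl h)
      by_cases h1 : c1.1 = "J"
      · have h2 : c2.1 ≠ "J" := fun h => hne (h1.trans h.symm)
        intro hnil
        have : c2 ∈ l := by
          simp only [hl, PySem.Dict.erase]
          simp [List.mem_filter, h2]
        rw [hnil] at this; exact absurd this (List.not_mem_nil)
      · intro hnil
        have : c1 ∈ l := by
          simp only [hl, PySem.Dict.erase]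
          simp [List.mem_filter, h1]
        rw [hnil] at this; exact absurd this (List.not_mem_nil)
  obtain ⟨p, rest, hcons⟩ := List.exists_cons_of_ne_nil hlne
  -- the common winner: first pair of l attaining the maximal count
  set r : String × Int := List.foldl (pvStep (fun q : String × Int => q.2)) p rest with hrdef
  -- A's side: maxv = r.2
  have hmaxv : PySem.List.max? (PySem.Dict.values (PySem.Dict.mk l)) (fun v => v) = some r.2 := by
    have h1 : PySem.Dict.values (PySem.Dict.mk l) = l.map Prod.snd := rfl
    rw [h1, pv_max?_map' Prod.snd (fun v => v) l, hcons,
        pv_max?_cons (fun q : String × Int => q.2) p rest]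
    rfl
  -- A's side: the filter-head is r
  have hA : ((l.filter (fun q => decide (r.2 ≤ q.2))).map Prod.fst).head? = some r.1 := by
    have h := pv_filter_head (fun q : String × Int => q.2) rest p
    rw [← hcons, ← hrdef] at h
    rw [List.head?_map, h]
    rfl
  -- B's side: the running-max loop returns r
  have hB : pvBestLoop (PySem.Dict.items (PySem.Dict.mk l)) none = some r := by
    have hit : PySem.Dict.items (PySem.Dict.mk l) = l := rfl
    rw [hit, hcons, pv_bestLoop_cons, ← hrdef]
  -- both ports pick the same card; the rest of the two computations is identical
  have hmcc :
      ((PySem.Dict.keys (PySem.Dict.mk (l.filter (fun q =>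
          decide (((PySem.List.max? (PySem.Dict.values (PySem.Dict.mk l)) (fun v => v)).getD 0) ≤ q.2))))).head?).getD ""
      = (((pvBestLoop (PySem.Dict.items (PySem.Dict.mk l)) none).map Prod.fst).getD "") := by
    rw [hmaxv, hB]
    have h3 : (PySem.Dict.keys (PySem.Dict.mk (l.filter (fun q => decide ((some r.2).getD 0 ≤ q.2))))).head?
        = some r.1 := by
      rw [PySem.Dict.keys_mk]
      simpa using hA
    rw [h3]
    rfl
  -- conclude: substitute the chosen card into the common tail computation
  have hd1 : PySem.Dict.erase (PySem.Dict.mk cc) "J" = PySem.Dict.mk l := by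
    simp only [hl]
  simp only [hd1]
  rw [hmcc]
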